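-- pv_equiv track=rewrite | github.com/thiagopelizoni/MathChallenges | src/problem_105.py | special
-- ===== SOURCE A (Python) =====
-- def special(a):
--     a = sorted(a)
--
--     for k in range(2, len(a) + 1):
--         if sum(a[:k]) <= sum(a[-k + 1 :]):
--             return False
--
--     sums = {0}
--     for x in a:
--         more = {s + x for s in sums}
--         if sums & more:
--             return False
--         sums |= more
--
--     return True
-- ===== SOURCE B (Python) =====
-- def special(a):
--     b = sorted(a)
--     n = len(b)
--     pref = [0]
--     for v in b:
--         pref.append(pref[-1] + v)
--     total = pref[n]
--     for k in range(2, n + 1):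
--         if pref[k] + pref[n - k + 1] <= total:
--             return False
--     seen = set()
--     for m in range(2 ** n):
--         s, t = 0, m
--         for v in b:
--             if t % 2:
--                 s += v
--             t //= 2
--         if s in seen:
--             return False
--         seen.add(s)
--     return True
-- ===== Notes on version B (the rewrite author's own statement) =====
-- stated objective: alternative
-- what changed: Rule 1 is tested against a prefix-sum table built in one pass instead of re-summing two slices per k, and the subset-sum distinctness test enumerates every subset sum directly by bitmask (masks 0..2^n-1, extracting bits) with a seen-set, instead of A's incremental set-doubling with per-step intersection tests.
import Mathlib
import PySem

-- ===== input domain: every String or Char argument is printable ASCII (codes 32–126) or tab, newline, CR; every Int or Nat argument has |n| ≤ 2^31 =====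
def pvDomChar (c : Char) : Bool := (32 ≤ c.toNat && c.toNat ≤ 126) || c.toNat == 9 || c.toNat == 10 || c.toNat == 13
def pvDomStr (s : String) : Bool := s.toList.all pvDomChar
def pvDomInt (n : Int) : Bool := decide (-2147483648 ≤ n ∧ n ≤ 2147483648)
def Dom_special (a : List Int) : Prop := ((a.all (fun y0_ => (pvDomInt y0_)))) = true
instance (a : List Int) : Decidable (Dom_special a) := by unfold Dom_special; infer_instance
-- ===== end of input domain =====

-- Alternative implementation: B tests rule 1 against a prefix-sum table instead of
-- re-summing two slices per k, and tests subset-sum distinctness by direct bitmask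
-- enumeration with a seen-set instead of A's incremental set-doubling with
-- per-step intersection tests (objective: alternative; not claimed faster).


-- ===== PORT A =====
-- for k in range(2, len(a)+1): if sum(a[:k]) <= sum(a[-k+1:]): return False
def specialRule1A (b : List Int) : List Int → Bool
  | [] => true
  | k :: ks =>
    if (PySem.List.slice b none (some k)).sum ≤ (PySem.List.slice b (some (-k + 1)) none).sum
    then false
    else specialRule1A b ks

-- sums = {0}; for x in a: more = {s+x for s in sums}; if sums & more: return False; sums |= more
def specialRule2A : PySem.Set Int → List Int → Bool
  | _, [] => true
  | sums, x :: xs =>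
    let more := PySem.Set.ofList (sums.map (fun s => s + x))
    if PySem.Set.inter sums more ≠ [] then false
    else specialRule2A (PySem.Set.union sums more) xs

def special (a : List Int) : Bool :=
  let b := PySem.List.sorted a (fun x => x) false
  specialRule1A b (PySem.List.pyRange 2 ((b.length : Int) + 1) 1) &&
    specialRule2A (PySem.Set.ofList [0]) b

-- ===== PORT B =====
-- for k in range(2, n+1): if pref[k] + pref[n-k+1] <= total: return False
-- (pref indices are always in range, so pyGetD with default 0 is exact)
def specialAltRule1 (pref : List Int) (n total : Int) : List Int → Bool
  | [] => true
  | k :: ks =>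
    if PySem.List.pyGetD pref k 0 + PySem.List.pyGetD pref (n - k + 1) 0 ≤ total
    then false
    else specialAltRule1 pref n total ks

-- s, t = 0, m; for v in b: (if t % 2: s += v); t //= 2
def specialAltMaskSum (b : List Int) (m : Int) : Int :=
  (b.foldl (fun st v =>
      (if PySem.Int.mod st.2 2 ≠ 0 then st.1 + v else st.1, PySem.Int.floordiv st.2 2))
    ((0 : Int), m)).1

-- seen = set(); for m in range(2**n): s = masksum(m); if s in seen: return False; seen.add(s)
def specialAltRule2 (b : List Int) : PySem.Set Int → List Int → Bool
  | _, [] => true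
  | seen, m :: ms =>
    let s := specialAltMaskSum b m
    if PySem.Set.contains seen s then false
    else specialAltRule2 b (PySem.Set.add seen s) ms

def special_alt (a : List Int) : Bool :=
  let b := PySem.List.sorted a (fun x => x) false
  let n : Int := b.length
  let pref := b.foldl (fun p v => p ++ [PySem.List.pyGetD p (-1) 0 + v]) [(0 : Int)]
  let total := PySem.List.pyGetD pref n 0
  specialAltRule1 pref n total (PySem.List.pyRange 2 (n + 1) 1) &&
    specialAltRule2 b PySem.Set.empty (PySem.List.pyRange 0 ((2 : Int) ^ b.length) 1)

-- ===== PRECONDITION & SPEC =====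
def Spec_special (a : List Int) (out : Bool) : Prop := out = special_alt a
instance (a : List Int) (out : Bool) : Decidable (Spec_special a out) := by unfold Spec_special; infer_instance

-- ===== CLAIM (what is proved, stated in full; the proofs are below) =====
def Claim_equal_special : Prop := ∀ (a : List Int), Dom_special a → Spec_special a (special a)

-- ===== LEMMAS AND PROOFS =====

-- abbreviations used only by the proofs
def pvStep (L : List Int) (x : Int) : List Int := L ++ L.map (· + x)

def pvPS : Int → List Int → List Int
  | _, [] => []
  | c, v :: vs => (c + v) :: pvPS (c + v) vs

def pvStepST (st : Int × Int) (v : Int) : Int × Int :=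
  (if PySem.Int.mod st.2 2 ≠ 0 then st.1 + v else st.1, PySem.Int.floordiv st.2 2)

theorem maskSum_eq (b : List Int) (m : Int) :
    specialAltMaskSum b m = (b.foldl pvStepST (0, m)).1 := rfl

-- the two rule-1 loops agree when their per-k conditions agree
theorem rule1_congr (b pref : List Int) (n total : Int) :
    ∀ ks : List Int,
      (∀ k ∈ ks, ((PySem.List.slice b none (some k)).sum ≤ (PySem.List.slice b (some (-k + 1)) none).sum
          ↔ PySem.List.pyGetD pref k 0 + PySem.List.pyGetD pref (n - k + 1) 0 ≤ total)) →
      specialRule1A b ks = specialAltRule1 pref n total ks := by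
  intro ks h
  induction ks with
  | nil => rfl
  | cons k ks ih =>
    have hk := h k (List.mem_cons_self ..)
    by_cases hc : (PySem.List.slice b none (some k)).sum ≤ (PySem.List.slice b (some (-k + 1)) none).sum
    · simp [specialRule1A, specialAltRule1, hc, hk.mp hc]
    · simp [specialRule1A, specialAltRule1, hc, hk.not.mp hc]
      exact ih fun k hkm => h k (List.mem_cons_of_mem _ hkm)

-- the prefix list B builds is [0] ++ partial sums
theorem pref_fold (bl : List Int) :
    ∀ (p : List Int) (c : Int),
      bl.foldl (fun p v => p ++ [PySem.List.pyGetD p (-1) 0 + v]) (p ++ [c]) = (p ++ [c]) ++ pvPS c bl := by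
  induction bl with
  | nil => simp [pvPS]
  | cons v vs ih =>
    intro p c
    simp only [List.foldl_cons, PySem.List.pyGetD_neg_one_append_singleton, pvPS]
    rw [show (p ++ [c]) ++ [c + v] = (p ++ [c]) ++ [c + v] from rfl, List.append_assoc p [c] [c + v],
      ← List.append_assoc p [c] [c+v]]
    rw [ih (p ++ [c]) (c + v)]
    simp

theorem length_pvPS (bl : List Int) : ∀ c, (pvPS c bl).length = bl.length := by
  induction bl with
  | nil => intro c; rfl
  | cons v vs ih => intro c; simp [pvPS, ih]

theorem ps_getElem (bl : List Int) :
    ∀ (c : Int) (i : Nat) (h : i < bl.length),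
      (pvPS c bl)[i]'(by rw [length_pvPS]; exact h) = c + (bl.take (i + 1)).sum := by
  induction bl with
  | nil => intro c i h; simp at h
  | cons v vs ih =>
    intro c i h
    cases i with
    | zero => simp [pvPS]
    | succ i =>
      simp only [pvPS, List.getElem_cons_succ, List.take_succ_cons, List.sum_cons]
      rw [ih (c + v) i (by simpa using h)]
      ring


theorem pref_getD (bl : List Int) (k : Int) (h0 : 0 ≤ k) (hk : k.toNat ≤ bl.length) :
    PySem.List.pyGetD (bl.foldl (fun p v => p ++ [PySem.List.pyGetD p (-1) 0 + v]) [(0 : Int)]) k 0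
      = (bl.take k.toNat).sum := by
  have hfold := pref_fold bl [] 0
  simp only [List.nil_append] at hfold
  rw [hfold]
  have hlen : ((0 : Int) :: pvPS 0 bl).length = bl.length + 1 := by simp [length_pvPS]
  rw [show ([(0 : Int)] ++ pvPS 0 bl) = (0 : Int) :: pvPS 0 bl from rfl]
  rw [PySem.List.pyGetD_eq_getElem _ _ h0 (by rw [hlen]; omega)]
  rcases Nat.eq_zero_or_pos k.toNat with h | h
  · simp [h]
  · obtain ⟨i, hi⟩ : ∃ i, k.toNat = i + 1 := ⟨k.toNat - 1, by omega⟩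
    simp only [hi] at hk ⊢
    rw [List.getElem_cons_succ]
    rw [ps_getElem bl 0 i (by omega)]
    simp

-- A's incremental set-doubling loop decides Nodup of the doubled multiset
theorem sublist_foldl_pvStep (xs : List Int) : ∀ M : List Int, List.Sublist M (xs.foldl pvStep M) := by
  induction xs with
  | nil => intro M; simp
  | cons x xs ih =>
    intro M
    exact List.Sublist.trans (List.sublist_append_left M (M.map (· + x))) (ih (pvStep M x))

theorem rule2A_spec (xs : List Int) :
    ∀ L : List Int, L.Nodup →
      specialRule2A (PySem.Set.ofList L) xs = decide (xs.foldl pvStep L).Nodup := by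
  induction xs with
  | nil => intro L hL; simp [specialRule2A, hL]
  | cons x xs ih =>
    intro L hL
    rw [PySem.Set.ofList_eq_self_of_nodup _ hL]
    have hmapnd : (L.map (· + x)).Nodup := hL.map (add_left_injective x)
    simp only [specialRule2A, List.foldl_cons]
    rw [PySem.Set.ofList_eq_self_of_nodup _ hmapnd]
    by_cases hdisj : L.Disjoint (L.map (· + x))
    · have hinter : PySem.Set.inter L (L.map (· + x)) = [] := by
        rw [List.eq_nil_iff_forall_not_mem]
        intro y hy
        have := (PySem.Set.mem_inter L (L.map (· + x)) y).mp hy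
        exact hdisj this.1 this.2
      have hnd' : (pvStep L x).Nodup := hL.append hmapnd hdisj
      have hun : PySem.Set.union L (L.map (· + x)) = L ++ L.map (· + x) := by
        show PySem.Set.update L (L.map (· + x)) = _
        exact PySem.Set.update_eq_append_of_disjoint L (L.map (· + x)) hmapnd
          (fun y hy hc => hdisj hc hy)
      simp only [hinter, ne_eq, not_true_eq_false, ite_false]
      rw [hun]
      have hIH := ih (pvStep L x) hnd'
      rw [PySem.Set.ofList_eq_self_of_nodup _ hnd'] at hIH
      exact hIH
    · rw [List.disjoint_left] at hdisj
      push Not at hdisj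
      obtain ⟨y, hy1, hy2⟩ := hdisj
      have hinter : PySem.Set.inter L (L.map (· + x)) ≠ [] :=
        List.ne_nil_of_mem ((PySem.Set.mem_inter L (L.map (· + x)) y).mpr ⟨hy1, hy2⟩)
      simp only [hinter, ne_eq, not_false_eq_true, if_true]
      have hnotnd : ¬ (pvStep L x).Nodup := by
        intro hnd
        exact List.disjoint_of_nodup_append hnd hy1 hy2
      have : ¬ (xs.foldl pvStep (pvStep L x)).Nodup := fun hnd =>
        hnotnd (hnd.sublist (sublist_foldl_pvStep xs (pvStep L x)))
      simp [this]

-- B's seen-set scan decides Nodup of the mask-sum list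
theorem rule2B_spec (b : List Int) :
    ∀ (ms prev : List Int), prev.Nodup →
      specialAltRule2 b (PySem.Set.ofList prev) ms
        = decide (prev ++ ms.map (specialAltMaskSum b)).Nodup := by
  intro ms
  induction ms with
  | nil => intro prev hnd; simp [specialAltRule2, hnd]
  | cons m ms ih =>
    intro prev hnd
    simp only [specialAltRule2]
    by_cases hmem : specialAltMaskSum b m ∈ prev
    · have hc : PySem.Set.contains (PySem.Set.ofList prev) (specialAltMaskSum b m) = true := by
        simp [PySem.Set.mem_ofList, hmem]
      simp only [hc, if_true]
      have : ¬ (prev ++ (m :: ms).map (specialAltMaskSum b)).Nodup := by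
        intro hnd'
        exact List.disjoint_of_nodup_append hnd' hmem (by simp)
      simp only [List.map_cons] at this
      simp [this]
    · have hc : PySem.Set.contains (PySem.Set.ofList prev) (specialAltMaskSum b m) = false := by
        simp [PySem.Set.mem_ofList, hmem]
      simp only [hc, Bool.false_eq_true, ite_false]
      rw [← PySem.Set.ofList_append_singleton]
      rw [ih (prev ++ [specialAltMaskSum b m]) (by simp [List.nodup_append, hnd]; exact fun a ha h => hmem (h ▸ ha))]
      simp

-- arithmetic on the bit-extraction fold
theorem foldST_snd (bl : List Int) :
    ∀ s t : Int, 0 ≤ t → (bl.foldl pvStepST (s, t)).2 = t / 2 ^ bl.length := by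
  induction bl with
  | nil => intro s t ht; simp
  | cons v vs ih =>
    intro s t ht
    simp only [List.foldl_cons, List.length_cons]
    have hdiv : PySem.Int.floordiv t 2 = t / 2 := PySem.Int.floordiv_eq_ediv_of_pos (by norm_num)
    show (vs.foldl pvStepST (pvStepST (s, t) v)).2 = _
    simp only [pvStepST]
    rw [hdiv, ih _ (t / 2) (by omega)]
    rw [Int.ediv_ediv_of_nonneg (by norm_num)]
    ring_nf

theorem foldST_shift (bl : List Int) :
    ∀ (s t c : Int), 0 ≤ t → 0 ≤ c →
      bl.foldl pvStepST (s, t + 2 ^ bl.length * c)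
        = ((bl.foldl pvStepST (s, t)).1, (bl.foldl pvStepST (s, t)).2 + c) := by
  induction bl with
  | nil => intro s t c ht hc; simp
  | cons v vs ih =>
    intro s t c ht hc
    simp only [List.foldl_cons, List.length_cons]
    have h2 : t + (2 : Int) ^ (vs.length + 1) * c = t + 2 ^ vs.length * c * 2 := by ring
    have hmod : PySem.Int.mod (t + 2 ^ (vs.length + 1) * c) 2 = PySem.Int.mod t 2 := by
      rw [PySem.Int.mod_eq_emod_of_pos (by norm_num), PySem.Int.mod_eq_emod_of_pos (by norm_num), h2]
      omega
    have hdiv : PySem.Int.floordiv (t + 2 ^ (vs.length + 1) * c) 2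
        = PySem.Int.floordiv t 2 + 2 ^ vs.length * c := by
      rw [PySem.Int.floordiv_eq_ediv_of_pos (by norm_num), PySem.Int.floordiv_eq_ediv_of_pos (by norm_num), h2]
      exact Int.add_mul_ediv_right t (2 ^ vs.length * c) (by norm_num)
    have ht2 : 0 ≤ PySem.Int.floordiv t 2 := by
      rw [PySem.Int.floordiv_eq_ediv_of_pos (by norm_num)]; omega
    show vs.foldl pvStepST (pvStepST (s, t + 2 ^ (vs.length + 1) * c) v) = _
    simp only [pvStepST, hmod, hdiv]
    exact ih _ (PySem.Int.floordiv t 2) c ht2 hc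

theorem maskSum_append_low (b : List Int) (x m : Int) (h0 : 0 ≤ m) (hm : m < 2 ^ b.length) :
    specialAltMaskSum (b ++ [x]) m = specialAltMaskSum b m := by
  rw [maskSum_eq, maskSum_eq, List.foldl_append]
  simp only [List.foldl_cons, List.foldl_nil, pvStepST]
  rw [foldST_snd b 0 m h0, Int.ediv_eq_zero_of_lt h0 hm]
  norm_num [PySem.Int.mod_eq_emod_of_pos (show (0:Int) < 2 by norm_num)]

theorem maskSum_append_high (b : List Int) (x j : Int) (h0 : 0 ≤ j) (hj : j < 2 ^ b.length) :
    specialAltMaskSum (b ++ [x]) (2 ^ b.length + j) = specialAltMaskSum b j + x := by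
  rw [maskSum_eq, maskSum_eq, List.foldl_append]
  rw [show (2 : Int) ^ b.length + j = j + 2 ^ b.length * 1 by ring]
  rw [foldST_shift b 0 j 1 h0 (by norm_num)]
  rw [foldST_snd b 0 j h0, Int.ediv_eq_zero_of_lt h0 hj]
  simp only [List.foldl_cons, List.foldl_nil, pvStepST]
  norm_num [PySem.Int.mod_eq_emod_of_pos (show (0:Int) < 2 by norm_num)]

-- the mask-sum list in mask order IS the doubled multiset
theorem maskList_eq_fold (bl : List Int) :
    (PySem.List.pyRange 0 ((2 : Int) ^ bl.length) 1).map (specialAltMaskSum bl)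
      = bl.foldl pvStep [0] := by
  induction bl using List.reverseRecOn with
  | nil => rfl
  | append_singleton b x ih =>
    have h1 : (0 : Int) ≤ 2 ^ b.length := by positivity
    have h2 : (2 : Int) ^ (b.length + 1) = 2 ^ b.length * 2 := by ring
    have hNt : (((2 : Int) ^ b.length).toNat : Int) = 2 ^ b.length := Int.toNat_of_nonneg h1
    simp only [List.length_append, List.length_cons, List.length_nil, Nat.zero_add]
    rw [PySem.List.pyRange_one_append 0 (2 ^ b.length) (2 ^ (b.length + 1)) h1 (by rw [h2]; nlinarith)]
    rw [List.map_append]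
    have hlow : (PySem.List.pyRange 0 (2 ^ b.length) 1).map (specialAltMaskSum (b ++ [x]))
        = (PySem.List.pyRange 0 (2 ^ b.length) 1).map (specialAltMaskSum b) := by
      apply List.map_congr_left
      intro m hm
      have := (PySem.List.mem_pyRange_one).mp hm
      exact maskSum_append_low b x m this.1 this.2
    have hhigh : (PySem.List.pyRange (2 ^ b.length) (2 ^ (b.length + 1)) 1).map (specialAltMaskSum (b ++ [x]))
        = ((PySem.List.pyRange 0 (2 ^ b.length) 1).map (specialAltMaskSum b)).map (· + x) := by
      rw [PySem.List.pyRange_one (2 ^ b.length) (2 ^ (b.length + 1)),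
        PySem.List.pyRange_one 0 (2 ^ b.length)]
      simp only [List.map_map, sub_zero]
      rw [show (2 : Int) ^ (b.length + 1) - 2 ^ b.length = 2 ^ b.length by ring]
      apply List.map_congr_left
      intro k hk
      have hkN : (k : Int) < 2 ^ b.length := by
        rw [← hNt]; exact_mod_cast List.mem_range.mp hk
      simp only [Function.comp_apply, zero_add]
      exact maskSum_append_high b x k (Int.natCast_nonneg k) hkN
    rw [hlow, hhigh, ih, List.foldl_append]
    rfl

-- the per-k rule-1 conditions of the two ports agree
theorem rule1_cond (b : List Int) (k : Int) (h2 : 2 ≤ k) (hk : k ≤ (b.length : Int)) :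
    ((PySem.List.slice b none (some k)).sum ≤ (PySem.List.slice b (some (-k + 1)) none).sum
      ↔ PySem.List.pyGetD (b.foldl (fun p v => p ++ [PySem.List.pyGetD p (-1) 0 + v]) [(0 : Int)]) k 0
          + PySem.List.pyGetD (b.foldl (fun p v => p ++ [PySem.List.pyGetD p (-1) 0 + v]) [(0 : Int)]) ((b.length : Int) - k + 1) 0
          ≤ PySem.List.pyGetD (b.foldl (fun p v => p ++ [PySem.List.pyGetD p (-1) 0 + v]) [(0 : Int)]) (b.length : Int) 0) := by
  have hkn : ((k - 1).toNat : Int) = k - 1 := Int.toNat_of_nonneg (by omega)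
  rw [PySem.List.slice_to b (show (0:Int) ≤ k by omega)]
  rw [show (-k + 1 : Int) = -(((k - 1).toNat : Int)) by omega]
  rw [PySem.List.slice_from_neg_natCast b (k - 1).toNat (by omega)]
  rw [pref_getD b k (by omega) (by omega)]
  rw [pref_getD b ((b.length : Int) - k + 1) (by omega) (by omega)]
  rw [pref_getD b (b.length : Int) (by omega) (by omega)]
  have htake := List.sum_take_add_sum_drop b (b.length - (k - 1).toNat)
  have hnk : ((b.length : Int) - k + 1).toNat = b.length - (k - 1).toNat := by omega
  have hlen : ((b.length : Int)).toNat = b.length := by omega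
  rw [hnk, hlen, List.take_length]
  omega

-- ===== VERDICT (by name: the statement is the Claim_ definition above) =====
theorem special_spec : Claim_equal_special := by
  unfold Claim_equal_special Spec_special
  intro a _
  simp only [special, special_alt]
  congr 1
  · apply rule1_congr
    intro k hkm
    have hb := (PySem.List.mem_pyRange_one).mp hkm
    exact rule1_cond _ k hb.1 (by omega)
  · rw [rule2A_spec _ [0] (by simp)]
    rw [show (PySem.Set.empty : PySem.Set Int) = PySem.Set.ofList [] from rfl]
    rw [rule2B_spec _ _ [] (by simp)]
    rw [maskList_eq_fold]
    simp
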